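-- pv_equiv track=rewrite | github.com/rf-iasys/OEIS | OEIS_A007052.py | A007052
-- ===== SOURCE A (Python) =====
-- def A007052(n):
--     marked = []
--     current = 1
--     k = 2
--
--     while len(marked) < n:
--         marked.append(k-1)
--         k += k + current - 1
--         current += k - 1
--
--     return marked
-- ===== SOURCE B (Python) =====
-- def A007052(n):
--     if n <= 0:
--         return []
--     if n == 1:
--         return [1]
--     res = [1, 3]
--     a, b = 1, 3
--     for _ in range(n - 2):
--         a, b = b, 4 * b - 2 * a
--         res.append(b)
--     return res
-- ===== Notes on version B (the rewrite author's own statement) =====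
-- stated objective: simpler
-- what changed: B replaces A's auxiliary current/k state machine by the closed linear recurrence a(n)=4*a(n-1)-2*a(n-2) of OEIS A007052, keeping only the last two sequence terms.
import Mathlib
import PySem

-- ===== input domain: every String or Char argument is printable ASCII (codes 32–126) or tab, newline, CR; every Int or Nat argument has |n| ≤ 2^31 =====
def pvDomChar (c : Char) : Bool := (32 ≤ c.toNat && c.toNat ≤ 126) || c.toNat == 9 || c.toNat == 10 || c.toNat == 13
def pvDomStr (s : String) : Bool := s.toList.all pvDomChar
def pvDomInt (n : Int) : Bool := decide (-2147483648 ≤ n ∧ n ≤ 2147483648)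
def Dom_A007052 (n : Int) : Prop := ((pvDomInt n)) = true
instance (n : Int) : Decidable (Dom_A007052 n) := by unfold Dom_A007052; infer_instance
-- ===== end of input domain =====

-- B replaces A's auxiliary current/k state machine by the two-term linear recurrence
-- a(n) = 4*a(n-1) - 2*a(n-2) of OEIS A007052 (objective: simpler).

-- ===== PORT A =====
-- A's while loop appends one element per iteration, so it runs exactly max(n,0) times;
-- the fuel is that count, the state (marked, current, k) is A's, updated exactly as in A.
def A007052.loopA : Nat → List Int → Int → Int → List Int
  | 0, marked, _, _ => marked
  | m + 1, marked, current, k =>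
      let marked' := marked ++ [k - 1]
      let k' := k + (k + current - 1)
      let current' := current + (k' - 1)
      A007052.loopA m marked' current' k'

def A007052 (n : Int) : List Int :=
  A007052.loopA n.toNat [] 1 2

-- ===== PORT B =====
def A007052_alt.loopB : Nat → Int → Int → List Int → List Int
  | 0, _, _, res => res
  | m + 1, a, b, res =>
      A007052_alt.loopB m b (4 * b - 2 * a) (res ++ [4 * b - 2 * a])

def A007052_alt (n : Int) : List Int :=
  if n ≤ 0 then []
  else if n = 1 then [1]
  else A007052_alt.loopB (n - 2).toNat 1 3 [1, 3]

-- ===== PRECONDITION & SPEC =====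
def Spec_A007052 (n : Int) (out : List Int) : Prop := out = A007052_alt n
instance (n : Int) (out : List Int) : Decidable (Spec_A007052 n out) := by unfold Spec_A007052; infer_instance

-- ===== CLAIM (what is proved, stated in full; the proofs are below) =====
def Claim_equal_A007052 : Prop := ∀ (n : Int), Dom_A007052 n → Spec_A007052 n (A007052 n)

-- ===== LEMMAS AND PROOFS =====

-- Invariant linking A's (current, k) to B's last two terms (a, b):
-- the next term A will append is k - 1 = 4b - 2a, and current = 2*(4b-2a) - 2b.
theorem loopA_eq_loopB (m : Nat) : ∀ (a b : Int) (res : List Int),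
    A007052.loopA m res (2 * (4 * b - 2 * a) - 2 * b) (4 * b - 2 * a + 1)
      = A007052_alt.loopB m a b res := by
  induction m with
  | zero => intro a b res; rfl
  | succ m ih =>
      intro a b res
      simp only [A007052.loopA, A007052_alt.loopB]
      have h1 : (4 * b - 2 * a + 1 : Int) - 1 = 4 * b - 2 * a := by ring
      rw [h1]
      have := ih b (4 * b - 2 * a) (res ++ [4 * b - 2 * a])
      convert this using 2 <;> ring

theorem A007052_spec_aux (n : Int) : A007052 n = A007052_alt n := by
  unfold A007052 A007052_alt
  by_cases h0 : n ≤ 0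
  · have : n.toNat = 0 := Int.toNat_of_nonpos h0
    simp [this, h0, A007052.loopA]
  · by_cases h1 : n = 1
    · subst h1; norm_num [A007052.loopA]
    · have hn2 : (2 : Int) ≤ n := by omega
      have ht : n.toNat = (n - 2).toNat + 2 := by omega
      rw [ht]
      simp only [A007052.loopA]
      have key := loopA_eq_loopB (n - 2).toNat 1 3 [1, 3]
      norm_num at key ⊢
      rw [if_neg h0, if_neg h1]
      convert key using 2

-- ===== VERDICT (by name: the statement is the Claim_ definition above) =====
theorem A007052_spec : Claim_equal_A007052 := by
  intro n _
  exact A007052_spec_aux n
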